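-- pv_equiv track=rewrite | github.com/imdash19/Python_Question_Bank | Sum of non-zero groups (separated by zeros) of a given list of numbers.py | sum_nonzero_groupsof_in_list
-- ===== SOURCE A (Python) =====
-- def sum_nonzero_groupsof_in_list(lst):
--     olst= []
--     ilst= []
--     for val in lst:
--         if val != 0:
--             ilst.append(val)
--         else:
--             if sum(ilst) != 0:
--                 olst.append(sum(ilst))
--             ilst= []
--     return olst
-- ===== SOURCE B (Python) =====
-- def sum_nonzero_groupsof_in_list(lst):
--     zeros = [i for i, v in enumerate(lst) if v == 0]
--     out = []
--     start = 0
--     for z in zeros: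
--         s = sum(lst[start:z])
--         if s != 0:
--             out.append(s)
--         start = z + 1
--     return out
-- ===== Notes on version B (the rewrite author's own statement) =====
-- stated objective: alternative
-- what changed: B first builds the index of zero positions and then folds over those boundary indices summing the slice between consecutive boundaries, instead of A's single accumulate-and-flush scan that maintains the current group as a growing list.
import Mathlib
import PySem

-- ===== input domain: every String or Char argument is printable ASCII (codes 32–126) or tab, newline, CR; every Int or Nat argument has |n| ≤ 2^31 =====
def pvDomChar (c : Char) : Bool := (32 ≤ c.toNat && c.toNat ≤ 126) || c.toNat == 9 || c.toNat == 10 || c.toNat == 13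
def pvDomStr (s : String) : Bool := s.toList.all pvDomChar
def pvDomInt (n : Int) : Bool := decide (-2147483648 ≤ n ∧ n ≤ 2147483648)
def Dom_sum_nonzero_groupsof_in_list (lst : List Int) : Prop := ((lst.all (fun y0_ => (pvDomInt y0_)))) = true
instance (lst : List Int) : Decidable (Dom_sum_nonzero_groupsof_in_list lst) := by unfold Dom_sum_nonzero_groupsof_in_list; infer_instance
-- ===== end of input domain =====

-- B builds the zero-position index first and folds over those boundaries summing slices,
-- instead of A's single accumulate-and-flush scan; objective: alternative decomposition.

-- ===== PORT A =====
def sum_nonzero_groupsof_in_list (lst : List Int) : List Int :=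
  (lst.foldl (fun (st : List Int × List Int) val =>
      if val ≠ 0 then (st.1, st.2 ++ [val])
      else (if st.2.sum ≠ 0 then st.1 ++ [st.2.sum] else st.1, [])) ([], [])).1

-- ===== PORT B =====
def sum_nonzero_groupsof_in_list_alt (lst : List Int) : List Int :=
  let zeros := ((PySem.List.enumerate lst).filter (fun p => p.2 == 0)).map (·.1)
  (zeros.foldl (fun (st : List Int × Int) z =>
      let s := (PySem.List.slice lst (some st.2) (some z)).sum
      (if s ≠ 0 then st.1 ++ [s] else st.1, z + 1)) ([], 0)).1

-- ===== PRECONDITION & SPEC =====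
def Spec_sum_nonzero_groupsof_in_list (lst : List Int) (out : List Int) : Prop :=
  out = sum_nonzero_groupsof_in_list_alt lst
instance (lst : List Int) (out : List Int) : Decidable (Spec_sum_nonzero_groupsof_in_list lst out) := by
  unfold Spec_sum_nonzero_groupsof_in_list; infer_instance

-- ===== CLAIM =====
def Claim_equal_sum_nonzero_groupsof_in_list : Prop :=
  ∀ (lst : List Int), Dom_sum_nonzero_groupsof_in_list lst →
    Spec_sum_nonzero_groupsof_in_list lst (sum_nonzero_groupsof_in_list lst)

-- ===== LEMMAS AND PROOFS =====

/-- Common specification: running-sum grouping; groups end at zeros, zero-sum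
groups are skipped, the trailing unterminated group is dropped. -/
def pvGroups (s : Int) : List Int → List Int
  | [] => []
  | v :: t => if v ≠ 0 then pvGroups (s + v) t else (if s ≠ 0 then [s] else []) ++ pvGroups 0 t

theorem pvA_inv (l olst ilst : List Int) :
    (l.foldl (fun (st : List Int × List Int) val =>
        if val ≠ 0 then (st.1, st.2 ++ [val])
        else (if st.2.sum ≠ 0 then st.1 ++ [st.2.sum] else st.1, [])) (olst, ilst)).1
      = olst ++ pvGroups ilst.sum l := by
  induction l generalizing olst ilst with
  | nil => simp [pvGroups]
  | cons x t ih =>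
    by_cases hx : x = 0
    · subst hx
      simp only [List.foldl_cons, pvGroups]
      rw [if_neg (by simp), ih]
      by_cases hs : ilst.sum ≠ 0
      · simp [hs]
      · simp [hs]
    · simp only [List.foldl_cons, pvGroups, if_pos hx]
      rw [ih]
      simp [List.sum_append]

theorem pvB_inv (t pre mid acc : List Int) :
    ((((PySem.List.enumerate t ((pre.length : Int) + (mid.length : Int))).filter
          (fun p => p.2 == 0)).map (·.1)).foldl
        (fun (st : List Int × Int) z =>
          let s := (PySem.List.slice (pre ++ mid ++ t) (some st.2) (some z)).sum
          (if s ≠ 0 then st.1 ++ [s] else st.1, z + 1)) (acc, (pre.length : Int))).1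
      = acc ++ pvGroups mid.sum t := by
  induction t generalizing pre mid acc with
  | nil => simp [PySem.List.enumerate_nil, pvGroups]
  | cons x t' ih =>
    rw [PySem.List.enumerate_cons]
    by_cases hx : x = 0
    · subst hx
      simp only [List.filter_cons, beq_self_eq_true, if_pos, List.map_cons]
      rw [List.foldl_cons]
      have hslice : PySem.List.slice (pre ++ mid ++ (0 :: t')) (some (pre.length : Int))
          (some ((pre.length : Int) + (mid.length : Int))) = mid := by
        rw [PySem.List.slice_natCast_add]
        rw [List.append_assoc, List.drop_left, List.take_left]
      have hre : pre ++ mid ++ (0 :: t') = (pre ++ mid ++ [0]) ++ [] ++ t' := by simp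
      have hIH := ih (pre ++ mid ++ [0]) []
        (if mid.sum ≠ 0 then acc ++ [mid.sum] else acc)
      simp only [List.length_append, List.length_cons, List.length_nil, List.sum_nil,
        Nat.cast_add, Nat.cast_one, Nat.cast_zero, add_zero, zero_add] at hIH
      rw [hslice, hre]
      have hacc : acc ++ pvGroups mid.sum (0 :: t')
          = (if mid.sum ≠ 0 then acc ++ [mid.sum] else acc) ++ pvGroups 0 t' := by
        by_cases hs : mid.sum ≠ 0
        · simp [pvGroups, hs]
        · simp [pvGroups, hs]
      rw [hacc]
      exact hIH
    · have hb : (x == 0) = false := by simpa using hx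
      simp only [List.filter_cons, hb, Bool.false_eq_true, if_false]
      have hre : pre ++ mid ++ (x :: t') = pre ++ (mid ++ [x]) ++ t' := by simp
      have hIH := ih pre (mid ++ [x]) acc
      simp only [List.length_append, List.length_cons, List.length_nil,
        Nat.cast_add, Nat.cast_one, zero_add, ← add_assoc] at hIH
      rw [hre, hIH]
      simp [pvGroups, hx, List.sum_append]

-- ===== VERDICT =====
theorem sum_nonzero_groupsof_in_list_spec : Claim_equal_sum_nonzero_groupsof_in_list := by
  intro lst _
  unfold Spec_sum_nonzero_groupsof_in_list sum_nonzero_groupsof_in_list sum_nonzero_groupsof_in_list_alt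
  have hB := pvB_inv lst [] [] []
  simp only [List.length_nil, Nat.cast_zero, Int.zero_add, List.nil_append, List.sum_nil] at hB
  rw [pvA_inv, hB]
  simp
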